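-- pv_equiv track=rewrite | github.com/miliar/Code_Jam_Webscraper | solutions_python/solutions_year16_round3_nr1/810.py | evac
-- ===== SOURCE A (Python) =====
-- from typing import List, Dict, Tuple
--
-- def build_cache(sen: List[int]) -> Dict[int, List[int]]:
--     cache = {}  # type: Dict[int, List[int]]
--
--     for i, s in enumerate(sen):
--         cache[s] = cache.get(s, []) + [i]
--
--     return cache
--
-- def remove(items: List[int], sen: List[int]) -> str:
--     op = ''
--     remove_count = min(2, len(items) - 2)
--     remove_count = 2 if remove_count == 0 else remove_count
--
--     for i, item in enumerate(items):
--         if i == remove_count: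
--             break
--         sen[item] -= 1
--         op += chr(65 + item)
--
--     assert 0 < len(op) <= 2
--     return op
--
-- def evac(sen: List[int]) -> str:
--     op = ''
--
--     cache = build_cache(sen)
--     m = max(cache.keys())
--
--     while m != 0:
--         op += remove(cache[m], sen) + ' '
--
--         cache = build_cache(sen)
--         m = max(cache.keys())
--
--     return op
-- ===== SOURCE B (Python) =====
-- def evac(sen):
--     # Level-sweep re-implementation: every index with value >= v is at level v
--     # when level v is drained, so process levels M..1 once each, no per-step
--     # max/cache rebuild and no mutation of sen (A mutates sen in place; the
--     # equivalence is about the return value).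
--     op = ''
--     M = max(sen)
--     v = M
--     while v > 0:
--         g = [i for i, s in enumerate(sen) if s >= v]
--         while g:
--             c = 1 if len(g) in (1, 3) else 2
--             for i in g[:c]:
--                 op += chr(65 + i)
--             op += ' '
--             g = g[c:]
--         v -= 1
--     return op
-- ===== Notes on version B (the rewrite author's own statement) =====
-- stated objective: faster
-- what changed: B sweeps the value levels max(sen)..1 once, computing each level's index group a single time and draining it in place, instead of rebuilding the value->indices dict and re-scanning for the max after every 1-2 decrements; B also does not mutate sen (A decrements it in place).
import Mathlib
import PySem

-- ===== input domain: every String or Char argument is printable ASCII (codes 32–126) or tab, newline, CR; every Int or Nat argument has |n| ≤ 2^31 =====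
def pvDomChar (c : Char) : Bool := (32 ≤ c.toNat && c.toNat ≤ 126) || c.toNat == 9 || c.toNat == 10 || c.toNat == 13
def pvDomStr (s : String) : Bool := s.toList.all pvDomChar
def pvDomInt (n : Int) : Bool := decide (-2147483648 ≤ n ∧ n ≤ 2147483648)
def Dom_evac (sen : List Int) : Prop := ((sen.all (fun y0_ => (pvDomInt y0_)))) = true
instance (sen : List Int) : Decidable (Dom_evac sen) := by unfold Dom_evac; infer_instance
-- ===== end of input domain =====

-- B replaces A's per-step dict rebuild + max re-scan by a single sweep over value
-- levels M..1 (every index with value ≥ v is at level v when that level is drained);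
-- A mutates sen in place, B does not — the equivalence proved here is about the
-- return value only.

-- ===== PORT A =====
def buildCache (sen : List Int) : PySem.Dict Int (List Int) :=
  (PySem.List.enumerate sen).foldl
    (fun cache p => cache.insert p.2 (cache.getD p.2 [] ++ [p.1])) PySem.Dict.empty

def removeGo (rc : Int) : List (Int × Int) → List Int → String → String × List Int
  | [], sen, op => (op, sen)
  | (i, item) :: rest, sen, op =>
    if i = rc then (op, sen)
    else removeGo rc rest (PySem.List.pySetD sen item (PySem.List.pyGetD sen item 0 - 1))
           (op ++ String.singleton (Char.ofNat (65 + item).toNat))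

def removeA (items : List Int) (sen : List Int) : String × List Int :=
  let rc0 : Int := min 2 ((items.length : Int) - 2)
  let rc : Int := if rc0 = 0 then 2 else rc0
  -- the final 'assert 0 < len(op) <= 2' always holds at A's call site; no-op
  removeGo rc (PySem.List.enumerate items) sen ""

def evacLoop : Nat → List Int → String → String
  | 0, _, op => op   -- fuel exhausted: reached only where Python A diverges (outside Pre_)
  | fuel + 1, sen, op =>
    match PySem.List.max? (buildCache sen).keys (fun x => x) with
    | none => op   -- Python: max() of an empty dict raises ValueError (sen = [], outside Pre_)
    | some m =>
      if m = 0 then op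
      else
        let p := removeA ((buildCache sen).getD m []) sen   -- cache[m]: m = max of keys is present
        evacLoop fuel p.2 (op ++ p.1 ++ " ")

def evac (sen : List Int) : String :=
  -- fuel: one unit per loop iteration; Σ max(s,0) + 1 always suffices (proved below)
  evacLoop ((sen.map (fun s => max s 0)).sum.toNat + 1) sen ""

-- ===== PORT B =====
def levelG (sen : List Int) (v : Int) : List Int :=
  ((PySem.List.enumerate sen).filter (fun p => decide (v ≤ p.2))).map (fun p => p.1)

def drainB : List Int → String → String
  | [], op => op
  | i0 :: rest, op =>
    let c : Nat := if (i0 :: rest).length = 1 ∨ (i0 :: rest).length = 3 then 1 else 2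
    drainB ((i0 :: rest).drop c)
      (((i0 :: rest).take c).foldl
        (fun o i => o ++ String.singleton (Char.ofNat (65 + i).toNat)) op ++ " ")
termination_by g _ => g.length
decreasing_by
  simp only [List.length_drop, List.length_cons]
  split <;> omega

def evacAltLevels (sen : List Int) : Nat → String → String
  | 0, op => op
  | v + 1, op => evacAltLevels sen v (drainB (levelG sen ((v : Int) + 1)) op)

def evac_alt (sen : List Int) : String :=
  -- Python: max(sen) raises ValueError on empty sen (excluded by Pre_evac)
  match PySem.List.max? sen (fun x => x) with
  | none => ""
  | some M => evacAltLevels sen M.toNat ""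

-- ===== PRECONDITION & SPEC =====
-- Pre_ excludes the empty list (A's max() raises ValueError) and all-negative lists
-- (A's while loop never terminates there); on every other input A returns normally.
def Pre_evac (sen : List Int) : Prop := sen ≠ [] ∧ ∃ x ∈ sen, 0 ≤ x
instance (sen : List Int) : Decidable (Pre_evac sen) := by unfold Pre_evac; infer_instance
def pvWitness_evac : List Int := [2, 1, 2]

def Spec_evac (sen : List Int) (out : String) : Prop := out = evac_alt sen
instance (sen : List Int) (out : String) : Decidable (Spec_evac sen out) := by unfold Spec_evac; infer_instance

-- ===== CLAIM (what is proved, stated in full; the proofs are below) =====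
def Claim_equal_evac : Prop := ∀ (sen : List Int), Dom_evac sen → Pre_evac sen → Spec_evac sen (evac sen)

-- ===== LEMMAS AND PROOFS =====

-- chunk size taken per drain step (the rule both programs compute)
def cR (g : List Int) : Nat := if g.length = 1 ∨ g.length = 3 then 1 else 2

-- the letters appended for one chunk, and the decrements applied to sen
def lettersS (t : List Int) : String :=
  t.foldl (fun o i => o ++ String.singleton (Char.ofNat (65 + i).toNat)) ""

def decL (t : List Int) (sen : List Int) : List Int :=
  t.foldl (fun s i => PySem.List.pySetD s i (PySem.List.pyGetD s i 0 - 1)) sen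

-- indices of sen whose value is exactly v, in index order (A's cache group)
def eqList (v : Int) (sen : List Int) : List Int :=
  ((PySem.List.enumerate sen).filter (fun p => p.2 == v)).map (fun p => p.1)

-- the one-step decrement map on enumerated pairs
def phi (t : List Int) (p : Int × Int) : Int × Int := if p.1 ∈ t then (p.1, p.2 - 1) else p

lemma cache_getD (sen : List Int) (v : Int) :
    (buildCache sen).getD v [] = eqList v sen := by
  have h1 : buildCache sen
      = ((PySem.List.enumerate sen).map (fun p => (p.2, p.1))).foldl
          (fun d q => d.modify q.1 [] (fun x => x ++ [q.2])) PySem.Dict.empty := by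
    rw [List.foldl_map]; rfl
  rw [h1, PySem.Dict.getD_foldl_modify_append]
  simp [eqList, List.filter_map, Function.comp_def]

lemma mem_keys_buildCache (sen : List Int) (k : Int) :
    k ∈ (buildCache sen).keys ↔ k ∈ sen := by
  have h1 : (buildCache sen).keys
      = PySem.Set.update (PySem.Dict.empty : PySem.Dict Int (List Int)).keys
          ((PySem.List.enumerate sen).map (fun p => p.2)) := by
    exact PySem.Dict.keys_foldl_insert_key _ _ _ _
  rw [h1, PySem.List.map_snd_enumerate]
  simp [PySem.Set.mem_update, PySem.Dict.keys_empty]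

lemma maxchar (l : List Int) (m : Int) :
    PySem.List.max? l (fun x => x) = some m ↔ m ∈ l ∧ ∀ y ∈ l, y ≤ m := by
  constructor
  · intro h
    exact ⟨PySem.List.max?_mem h, fun y hy => PySem.List.max?_isMax h y hy⟩
  · rintro ⟨hm, hb⟩
    cases hmax : PySem.List.max? l (fun x => x) with
    | none => exact absurd ((PySem.List.max?_eq_none_iff l _).mp hmax ▸ hm) (List.not_mem_nil)
    | some m' =>
      have h1 := PySem.List.max?_mem hmax
      have h2 := PySem.List.max?_isMax hmax m hm
      exact congrArg some (le_antisymm (hb m' h1) h2)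

lemma max_keys_eq (sen : List Int) :
    PySem.List.max? (buildCache sen).keys (fun x => x) = PySem.List.max? sen (fun x => x) := by
  cases h : PySem.List.max? sen (fun x => x) with
  | none =>
    rw [PySem.List.max?_eq_none_iff] at h ⊢
    subst h
    have := mem_keys_buildCache [] -- keys has no members
    rcases hk : (buildCache ([]:List Int)).keys with _ | ⟨a, t⟩
    · rfl
    · exfalso; have := (mem_keys_buildCache [] a).mp (by rw [hk]; exact List.mem_cons_self ..)
      simp at this
  | some m =>
    rw [maxchar] at h ⊢
    exact ⟨(mem_keys_buildCache sen m).mpr h.1, fun y hy => h.2 y ((mem_keys_buildCache sen y).mp hy)⟩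

lemma mem_enumerate (sen : List Int) (s : Int) (p : Int × Int) :
    p ∈ PySem.List.enumerate sen s ↔
      ∃ j : Nat, ∃ h : j < sen.length, p.1 = s + j ∧ p.2 = sen[j] := by
  induction sen generalizing s with
  | nil => simp [PySem.List.enumerate_nil]
  | cons a l ih =>
    rw [PySem.List.enumerate_cons]
    constructor
    · intro h
      rcases List.mem_cons.mp h with h | h
      · exact ⟨0, by simp, by simp [h]⟩
      · rcases (ih (s+1)).mp h with ⟨j, hj, h1, h2⟩
        exact ⟨j+1, by simpa using hj, by push_cast; omega, by simpa using h2⟩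
    · rintro ⟨j, hj, h1, h2⟩
      cases j with
      | zero =>
        obtain ⟨p1, p2⟩ := p
        simp at h1 h2
        simp [h1, h2]
      | succ j =>
        right; apply (ih (s+1)).mpr
        exact ⟨j, by simpa using hj, by push_cast at h1 ⊢; omega, by simpa using h2⟩

lemma lettersS_from (t : List Int) (op : String) :
    t.foldl (fun o i => o ++ String.singleton (Char.ofNat (65 + i).toNat)) op
      = op ++ lettersS t := by
  induction t generalizing op with
  | nil => simp [lettersS]
  | cons a l ih =>
    simp only [lettersS, List.foldl_cons]
    rw [ih, ih ("" ++ _), String.append_assoc]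
    simp only [String.empty_append, lettersS]

lemma removeGo_lt (rc : Int) (items : List Int) : ∀ (s : Int) (sen : List Int) (op : String),
    rc < s →
    removeGo rc (PySem.List.enumerate items s) sen op
      = (op ++ lettersS items, decL items sen) := by
  induction items with
  | nil => intro s sen op h; simp [PySem.List.enumerate_nil, removeGo, lettersS, decL]
  | cons a l ih =>
    intro s sen op h
    rw [PySem.List.enumerate_cons]
    simp only [removeGo, if_neg (by omega : ¬ s = rc)]
    rw [ih (s+1) _ _ (by omega)]
    simp only [lettersS, decL, List.foldl_cons]
    rw [lettersS_from l ("" ++ _), ← String.append_assoc]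
    simp only [String.empty_append, lettersS]

lemma removeGo_ge (rc : Int) (items : List Int) : ∀ (s : Int) (sen : List Int) (op : String),
    s ≤ rc →
    removeGo rc (PySem.List.enumerate items s) sen op
      = (op ++ lettersS (items.take (rc - s).toNat), decL (items.take (rc - s).toNat) sen) := by
  induction items with
  | nil => intro s sen op h; simp [PySem.List.enumerate_nil, removeGo, lettersS, decL]
  | cons a l ih =>
    intro s sen op h
    rw [PySem.List.enumerate_cons]
    by_cases hs : s = rc
    · subst hs
      simp [removeGo, lettersS, decL]
    · simp only [removeGo, if_neg hs]
      rw [ih (s+1) _ _ (by omega)]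
      have ht : (rc - s).toNat = (rc - (s+1)).toNat + 1 := by omega
      rw [ht, List.take_succ_cons]
      simp only [lettersS, decL, List.foldl_cons]
      rw [lettersS_from _ ("" ++ _), ← String.append_assoc]
      simp only [String.empty_append, lettersS]

lemma removeA_eq (items sen : List Int) :
    removeA items sen = (lettersS (items.take (cR items)), decL (items.take (cR items)) sen) := by
  match items with
  | [] =>
    simp [removeA, removeGo, cR, lettersS, decL, PySem.List.enumerate_nil]
  | [a] =>
    have h : (if (min 2 (([a].length : Int) - 2)) = 0 then (2:Int) else min 2 (([a].length : Int) - 2)) = -1 := by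
      norm_num
    rw [removeA, h, removeGo_lt _ _ 0 _ _ (by omega)]
    simp [cR, lettersS]
  | [a, b] =>
    have h : (if (min 2 (([a,b].length : Int) - 2)) = 0 then (2:Int) else min 2 (([a,b].length : Int) - 2)) = 2 := by
      norm_num
    rw [removeA, h, removeGo_ge _ _ 0 _ _ (by omega)]
    norm_num [cR]
    exact ⟨rfl, rfl⟩
  | [a, b, c] =>
    have h : (if (min 2 (([a,b,c].length : Int) - 2)) = 0 then (2:Int) else min 2 (([a,b,c].length : Int) - 2)) = 1 := by
      norm_num
    rw [removeA, h, removeGo_ge _ _ 0 _ _ (by omega)]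
    norm_num [cR]
  | a :: b :: c :: d :: rest =>
    have h : (if (min 2 (((a :: b :: c :: d :: rest).length : Int) - 2)) = 0 then (2:Int)
        else min 2 (((a :: b :: c :: d :: rest).length : Int) - 2)) = 2 := by
      have : min 2 (((a :: b :: c :: d :: rest).length : Int) - 2) = 2 := by simp; omega
      rw [this]; norm_num
    rw [removeA, h, removeGo_ge _ _ 0 _ _ (by omega)]
    have hc : cR (a :: b :: c :: d :: rest) = 2 := by simp [cR]
    rw [hc]
    norm_num
    exact ⟨rfl, rfl⟩

lemma drain_step (g : List Int) (op : String) (h : g ≠ []) :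
    drainB g op = drainB (g.drop (cR g)) (op ++ lettersS (g.take (cR g)) ++ " ") := by
  match g with
  | i0 :: rest =>
    rw [drainB]
    rw [lettersS_from]
    rfl

lemma enum_fst_lb (sen : List Int) (s : Int) (p : Int × Int) (hp : p ∈ PySem.List.enumerate sen s) :
    s ≤ p.1 := by
  rcases (mem_enumerate sen s p).mp hp with ⟨j, hj, h1, _⟩
  omega

lemma enum_set (sen : List Int) (j : Nat) (x : Int) (s : Int) (hj : j < sen.length) :
    PySem.List.enumerate (sen.set j x) s
      = (PySem.List.enumerate sen s).map (fun p => if p.1 = s + j then (p.1, x) else p) := by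
  induction sen generalizing j s with
  | nil => simp at hj
  | cons a l ih =>
    cases j with
    | zero =>
      simp only [List.set_cons_zero, PySem.List.enumerate_cons, List.map_cons]
      rw [if_pos (by simp)]
      congr 1
      symm
      have h2 : ∀ p ∈ PySem.List.enumerate l (s+1),
          (if p.1 = s + ((0:Nat):Int) then (p.1, x) else p) = p := by
        intro p hp
        have := enum_fst_lb l (s+1) p hp
        rw [if_neg (by push_cast; omega)]
      rw [List.map_congr_left h2, List.map_id']
    | succ j =>
      simp only [List.set_cons_succ, PySem.List.enumerate_cons, List.map_cons]
      congr 1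
      · rw [if_neg (by push_cast; omega)]
      · rw [ih j (s+1) (by simpa using hj)]
        apply List.map_congr_left
        intro p hp
        have : (s + 1 + (j:Int)) = s + ((j:Nat)+1 : Nat) := by push_cast; omega
        rw [this]

lemma dec_enum (t : List Int) : ∀ (sen : List Int), t.Nodup →
    (∀ i ∈ t, 0 ≤ i ∧ i < (sen.length : Int)) →
    PySem.List.enumerate (decL t sen) = (PySem.List.enumerate sen).map (phi t) := by
  induction t with
  | nil =>
    intro sen _ _
    have hphi : phi [] = id := by funext p; simp [phi]
    simp [decL, hphi]
  | cons i rest ih =>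
    intro sen hnd hin
    have hi0 : 0 ≤ i := (hin i (by simp)).1
    have hilt : i.toNat < sen.length := by have := (hin i (by simp)).2; omega
    have hget : PySem.List.pyGetD sen i 0 = sen[i.toNat] :=
      PySem.List.pyGetD_eq_getElem sen 0 hi0 (by omega)
    have hset : PySem.List.pySetD sen i (PySem.List.pyGetD sen i 0 - 1)
        = sen.set i.toNat (sen[i.toNat] - 1) := by
      rw [PySem.List.pySetD_of_nonneg _ _ hi0, hget]
    have hstep : decL (i :: rest) sen = decL rest (sen.set i.toNat (sen[i.toNat] - 1)) := by
      simp [decL, hset]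
    rw [hstep, ih _ (hnd.of_cons) (by
      intro k hk
      have := hin k (by simp [hk])
      simpa using this)]
    rw [enum_set sen i.toNat (sen[i.toNat] - 1) 0 hilt]
    rw [List.map_map]
    apply List.map_congr_left
    intro p hp
    rcases (mem_enumerate sen 0 p).mp hp with ⟨j, hj, h1, h2⟩
    have hnotmem : i ∉ rest := by
      have := hnd; simp at this; exact this.1
    by_cases hpi : p.1 = i
    · have hji : j = i.toNat := by omega
      subst hji
      simp only [Function.comp_apply, phi]
      rw [if_pos (by omega : p.1 = 0 + ((i.toNat) : Int))]
      rw [if_neg (by simpa [hpi] using hnotmem), if_pos (by simp [hpi])]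
      simp [hpi, h2]
    · simp only [Function.comp_apply, phi]
      rw [if_neg (by omega : ¬ p.1 = 0 + (i.toNat : Int))]
      by_cases hpr : p.1 ∈ rest
      · rw [if_pos hpr, if_pos (by simp [hpr])]
      · rw [if_neg hpr, if_neg (by simp [hpi, hpr])]

lemma nodup_levelG (sen : List Int) (v : Int) : (levelG sen v).Nodup := by
  have h1 : (levelG sen v).Sublist ((PySem.List.enumerate sen).map (fun p => p.1)) :=
    List.Sublist.map _ List.filter_sublist
  have h2 : ((PySem.List.enumerate sen).map (fun p => p.1)).Nodup := by
    rw [PySem.List.map_fst_enumerate]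
    exact PySem.List.nodup_pyRange_one 0 _
  exact h1.nodup h2

lemma mem_levelG (sen : List Int) (v : Int) (i : Int) :
    i ∈ levelG sen v ↔ ∃ p ∈ PySem.List.enumerate sen 0, p.1 = i ∧ v ≤ p.2 := by
  simp only [levelG, List.mem_map, List.mem_filter]
  constructor
  · rintro ⟨p, ⟨hp, hle⟩, rfl⟩
    exact ⟨p, hp, rfl, by simpa using hle⟩
  · rintro ⟨p, hp, rfl, hle⟩
    exact ⟨p, ⟨hp, by simpa using hle⟩, rfl⟩

lemma levels_cong (sen sen' : List Int) (n : Nat)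
    (h : ∀ v : Int, 1 ≤ v → v ≤ (n : Int) → levelG sen v = levelG sen' v) :
    ∀ op, evacAltLevels sen n op = evacAltLevels sen' n op := by
  induction n with
  | zero => intro op; rfl
  | succ v ih =>
    intro op
    rw [evacAltLevels, evacAltLevels]
    rw [h ((v:Int)+1) (by omega) (by push_cast; omega)]
    exact ih (fun w h1 h2 => h w h1 (by push_cast at h2 ⊢; omega)) _

lemma sum_le_sub_one {α : Type} (L : List α) (f g : α → Int) (a : α) (ha : a ∈ L)
    (hle : ∀ x ∈ L, g x ≤ f x) (hlt : g a ≤ f a - 1) :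
    (L.map g).sum ≤ (L.map f).sum - 1 := by
  induction L with
  | nil => simp at ha
  | cons b l ih =>
    simp only [List.map_cons, List.sum_cons]
    rcases List.mem_cons.mp ha with rfl | ha'
    · have : (l.map g).sum ≤ (l.map f).sum := by
        have : ∀ x ∈ l, g x ≤ f x := fun x hx => hle x (by simp [hx])
        exact List.sum_le_sum (by simpa using fun x hx => this x hx)
      omega
    · have hb : g b ≤ f b := hle b (by simp)
      have := ih ha' (fun x hx => hle x (by simp [hx]))
      omega

lemma phi_fst (t : List Int) (p : Int × Int) : (phi t p).1 = p.1 := by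
  simp only [phi]; split <;> rfl

lemma enum_snd_mem (sen : List Int) (s : Int) (p : Int × Int)
    (hp : p ∈ PySem.List.enumerate sen s) : p.2 ∈ sen := by
  rcases (mem_enumerate sen s p).mp hp with ⟨j, hj, _, h2⟩
  rw [h2]; exact List.getElem_mem hj

lemma enum_fst_inj (sen : List Int) (s : Int) (p q : Int × Int)
    (hp : p ∈ PySem.List.enumerate sen s) (hq : q ∈ PySem.List.enumerate sen s)
    (h : p.1 = q.1) : p = q := by
  rcases (mem_enumerate sen s p).mp hp with ⟨j, hj, h1, h2⟩
  rcases (mem_enumerate sen s q).mp hq with ⟨k, hk, h3, h4⟩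
  have : j = k := by omega
  subst this
  cases p; cases q; simp_all

lemma mem_sen_pair (sen : List Int) (y : Int) :
    y ∈ sen ↔ ∃ p ∈ PySem.List.enumerate sen 0, p.2 = y := by
  constructor
  · intro hy
    rw [← PySem.List.map_snd_enumerate sen 0] at hy
    rcases List.mem_map.mp hy with ⟨p, hp, h⟩
    exact ⟨p, hp, h⟩
  · rintro ⟨p, hp, h⟩
    rw [← PySem.List.map_snd_enumerate sen 0]
    exact List.mem_map.mpr ⟨p, hp, h⟩

lemma eqList_eq_levelG (sen : List Int) (m : Int) (hub : ∀ y ∈ sen, y ≤ m) :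
    eqList m sen = levelG sen m := by
  unfold eqList levelG
  congr 1
  apply List.filter_congr
  intro p hp
  have := hub p.2 (enum_snd_mem sen 0 p hp)
  by_cases h : p.2 = m
  · simp [h]
  · have h2 : ¬ m ≤ p.2 := fun hmle => h (le_antisymm this hmle)
    simp [h, h2]

lemma filter_not_mem_take (l : List Int) (c : Nat) (h : l.Nodup) :
    l.filter (fun x => !decide (x ∈ l.take c)) = l.drop c := by
  rw [show l.filter (fun x => !decide (x ∈ l.take c))
        = (l.take c ++ l.drop c).filter (fun x => !decide (x ∈ l.take c)) from by
      rw [List.take_append_drop]]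
  rw [List.filter_append]
  have h1 : (l.take c).filter (fun x => !decide (x ∈ l.take c)) = [] := by
    rw [List.filter_eq_nil_iff]
    intro a ha
    simp [ha]
  have hdisj : List.Disjoint (l.take c) (l.drop c) := List.disjoint_take_drop h le_rfl
  have h2 : (l.drop c).filter (fun x => !decide (x ∈ l.take c)) = l.drop c := by
    rw [List.filter_eq_self]
    intro a ha
    simp only [Bool.not_eq_eq_eq_not, Bool.not_true, decide_eq_false_iff_not]
    exact fun hmem => hdisj hmem ha
  rw [h1, h2, List.nil_append]

lemma levelG_decL (sen : List Int) (t : List Int) (v : Int)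
    (hnd : t.Nodup) (hin : ∀ i ∈ t, 0 ≤ i ∧ i < (sen.length : Int)) :
    levelG (decL t sen) v
      = ((PySem.List.enumerate sen).filter (fun p => decide (v ≤ (phi t p).2))).map
          (fun p => p.1) := by
  unfold levelG
  rw [dec_enum t sen hnd hin, List.filter_map, List.map_map]
  apply List.map_congr_left
  intro p hp
  exact phi_fst t p

lemma levelG_decL_lt (sen : List Int) (t : List Int) (m v : Int)
    (hnd : t.Nodup) (hin : ∀ i ∈ t, 0 ≤ i ∧ i < (sen.length : Int))
    (hPT : ∀ p ∈ PySem.List.enumerate sen 0, p.1 ∈ t → p.2 = m)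
    (_hv1 : 1 ≤ v) (hv : v ≤ m - 1) :
    levelG (decL t sen) v = levelG sen v := by
  rw [levelG_decL sen t v hnd hin]
  unfold levelG
  congr 1
  apply List.filter_congr
  intro p hp
  by_cases h : p.1 ∈ t
  · have hv2 := hPT p hp h
    simp only [phi, if_pos h]
    simp [hv2]
    omega
  · simp [phi, if_neg h]

lemma levelG_decL_top (sen : List Int) (m : Int) (c : Nat)
    (hnd : (levelG sen m).take c |>.Nodup)
    (hin : ∀ i ∈ (levelG sen m).take c, 0 ≤ i ∧ i < (sen.length : Int))
    (hPT : ∀ p ∈ PySem.List.enumerate sen 0, p.1 ∈ (levelG sen m).take c → p.2 = m) :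
    levelG (decL ((levelG sen m).take c) sen) m = (levelG sen m).drop c := by
  rw [levelG_decL sen _ m hnd hin]
  have hcong : ((PySem.List.enumerate sen).filter
        (fun p => decide (m ≤ (phi ((levelG sen m).take c) p).2)))
      = ((PySem.List.enumerate sen).filter
        (fun p => !decide (p.1 ∈ (levelG sen m).take c) && decide (m ≤ p.2))) := by
    apply List.filter_congr
    intro p hp
    by_cases h : p.1 ∈ (levelG sen m).take c
    · have hv2 := hPT p hp h
      simp only [phi, if_pos h]
      simp [hv2, h]
    · simp [phi, h]
  rw [hcong, ← List.filter_filter]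
  have hpush : ((PySem.List.enumerate sen).filter (fun p => decide (m ≤ p.2))
        |>.filter (fun p => !decide (p.1 ∈ (levelG sen m).take c))).map (fun p => p.1)
      = (((PySem.List.enumerate sen).filter (fun p => decide (m ≤ p.2))).map (fun p => p.1)
          |>.filter (fun i => !decide (i ∈ (levelG sen m).take c))) := by
    rw [List.filter_map]
    rfl
  rw [hpush]
  exact filter_not_mem_take (levelG sen m) c (nodup_levelG sen m)

lemma mem_decL (sen t : List Int) (hnd : t.Nodup)
    (hin : ∀ i ∈ t, 0 ≤ i ∧ i < (sen.length : Int)) (y : Int) :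
    y ∈ decL t sen ↔ ∃ p ∈ PySem.List.enumerate sen 0, (phi t p).2 = y := by
  rw [mem_sen_pair (decL t sen) y]
  constructor
  · rintro ⟨q, hq, h⟩
    rw [dec_enum t sen hnd hin] at hq
    rcases List.mem_map.mp hq with ⟨p, hp, rfl⟩
    exact ⟨p, hp, h⟩
  · rintro ⟨p, hp, h⟩
    refine ⟨phi t p, ?_, h⟩
    rw [dec_enum t sen hnd hin]
    exact List.mem_map.mpr ⟨p, hp, rfl⟩

lemma levelG_valid (sen : List Int) (v : Int) :
    ∀ i ∈ levelG sen v, 0 ≤ i ∧ i < (sen.length : Int) := by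
  intro i hi
  rcases (mem_levelG sen v i).mp hi with ⟨p, hp, rfl, _⟩
  rcases (mem_enumerate sen 0 p).mp hp with ⟨j, hj, h1, _⟩
  omega

lemma levelG_pairs (sen : List Int) (m : Int) (hub : ∀ y ∈ sen, y ≤ m) :
    ∀ p ∈ PySem.List.enumerate sen 0, p.1 ∈ levelG sen m → p.2 = m := by
  intro p hp hmem
  rcases (mem_levelG sen m p.1).mp hmem with ⟨q, hq, hq1, hq2⟩
  have := enum_fst_inj sen 0 p q hp hq hq1.symm
  subst this
  exact le_antisymm (hub p.2 (enum_snd_mem sen 0 p hp)) hq2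

lemma max_decL_rem (sen : List Int) (m : Int) (c : Nat)
    (hmax : PySem.List.max? sen (fun x => x) = some m)
    (hne : (levelG sen m).drop c ≠ []) :
    PySem.List.max? (decL ((levelG sen m).take c) sen) (fun x => x) = some m := by
  have hub : ∀ y ∈ sen, y ≤ m := ((maxchar sen m).mp hmax).2
  have hndl := nodup_levelG sen m
  have hnd : ((levelG sen m).take c).Nodup := hndl.take
  have hin : ∀ i ∈ (levelG sen m).take c, 0 ≤ i ∧ i < (sen.length : Int) :=
    fun i hi => levelG_valid sen m i (List.take_subset c _ hi)
  have hdisj : List.Disjoint ((levelG sen m).take c) ((levelG sen m).drop c) :=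
    List.disjoint_take_drop hndl le_rfl
  rw [maxchar]
  constructor
  · -- m is still a value: any index left at level m keeps value m
    rcases List.exists_mem_of_ne_nil _ hne with ⟨i, hi⟩
    have himem : i ∈ levelG sen m := List.drop_subset c _ hi
    rcases (mem_levelG sen m i).mp himem with ⟨p, hp, hp1, hp2⟩
    have hpv : p.2 = m := le_antisymm (hub p.2 (enum_snd_mem sen 0 p hp)) hp2
    have hnt : p.1 ∉ (levelG sen m).take c := by
      rw [hp1]; exact fun hmem => hdisj hmem hi
    rw [mem_decL sen _ hnd hin]
    exact ⟨p, hp, by simp [phi, hnt, hpv]⟩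
  · -- every value of the new state is ≤ m
    intro y hy
    rcases (mem_decL sen _ hnd hin y).mp hy with ⟨p, hp, rfl⟩
    have := hub p.2 (enum_snd_mem sen 0 p hp)
    simp only [phi]
    split <;> simp <;> omega

lemma max_decL_done (sen : List Int) (m : Int) (c : Nat)
    (hmax : PySem.List.max? sen (fun x => x) = some m)
    (_hm1 : 1 ≤ m)
    (hdone : (levelG sen m).drop c = [])
    (htne : (levelG sen m).take c ≠ []) :
    PySem.List.max? (decL ((levelG sen m).take c) sen) (fun x => x) = some (m - 1) := by
  have hub : ∀ y ∈ sen, y ≤ m := ((maxchar sen m).mp hmax).2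
  have hndl := nodup_levelG sen m
  have hnd : ((levelG sen m).take c).Nodup := hndl.take
  have hin : ∀ i ∈ (levelG sen m).take c, 0 ≤ i ∧ i < (sen.length : Int) :=
    fun i hi => levelG_valid sen m i (List.take_subset c _ hi)
  have htall : (levelG sen m).take c = levelG sen m := by
    have := List.take_append_drop c (levelG sen m)
    rw [hdone, List.append_nil] at this
    exact this
  rw [maxchar]
  constructor
  · -- m - 1 is attained: a decremented index
    rcases List.exists_mem_of_ne_nil _ htne with ⟨i, hi⟩
    have himem : i ∈ levelG sen m := htall ▸ hi
    rcases (mem_levelG sen m i).mp himem with ⟨p, hp, hp1, hp2⟩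
    have hpv : p.2 = m := le_antisymm (hub p.2 (enum_snd_mem sen 0 p hp)) hp2
    rw [mem_decL sen _ hnd hin]
    exact ⟨p, hp, by simp [phi, hp1 ▸ hi, hpv]⟩
  · -- every new value is ≤ m - 1
    intro y hy
    rcases (mem_decL sen _ hnd hin y).mp hy with ⟨p, hp, rfl⟩
    have hle := hub p.2 (enum_snd_mem sen 0 p hp)
    by_cases h : p.1 ∈ (levelG sen m).take c
    · simp [phi, h]; omega
    · have hnm : p.2 ≠ m := by
        intro hv
        apply h
        rw [htall, mem_levelG]
        exact ⟨p, hp, rfl, le_of_eq hv.symm⟩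
      simp only [phi, if_neg h]
      omega

lemma sumdec (sen : List Int) (m : Int) (t : List Int)
    (hm1 : 1 ≤ m) (hnd : t.Nodup)
    (hin : ∀ i ∈ t, 0 ≤ i ∧ i < (sen.length : Int))
    (hPT : ∀ p ∈ PySem.List.enumerate sen 0, p.1 ∈ t → p.2 = m)
    (htne : t ≠ []) :
    ((decL t sen).map (fun s => max s 0)).sum ≤ ((sen.map (fun s => max s 0)).sum) - 1 := by
  have hd : decL t sen = (PySem.List.enumerate sen).map (fun p => (phi t p).2) := by
    conv_lhs => rw [← PySem.List.map_snd_enumerate (decL t sen) 0]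
    rw [dec_enum t sen hnd hin, List.map_map]
    rfl
  have hs : sen = (PySem.List.enumerate sen).map (fun p => p.2) :=
    (PySem.List.map_snd_enumerate sen 0).symm
  rw [hd]
  conv_rhs => rw [hs]
  rw [List.map_map, List.map_map]
  rcases List.exists_mem_of_ne_nil _ htne with ⟨i, hi⟩
  have hii := hin i hi
  have : ∃ p ∈ PySem.List.enumerate sen 0, p.1 = i := by
    refine ⟨((i.toNat : Int), sen[i.toNat]'(by omega)), ?_, by omega⟩
    rw [mem_enumerate]
    exact ⟨i.toNat, by omega, by omega, rfl⟩
  rcases this with ⟨a, ha, ha1⟩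
  have hav : a.2 = m := hPT a ha (ha1 ▸ hi)
  apply sum_le_sub_one _ _ _ a ha
  · intro p hp
    simp only [Function.comp_apply, phi]
    split <;> simp <;> omega
  · simp only [Function.comp_apply, phi, if_pos (ha1 ▸ hi : a.1 ∈ t), hav]
    omega

lemma sum_maxzero_nonneg (sen : List Int) : 0 ≤ (sen.map (fun s => max s 0)).sum := by
  apply List.sum_nonneg
  intro x hx
  rcases List.mem_map.mp hx with ⟨s, _, rfl⟩
  exact le_max_right s 0

lemma core : ∀ fuel : Nat, ∀ (sen : List Int) (op : String) (m : Int),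
    PySem.List.max? sen (fun x => x) = some m → 1 ≤ m →
    ((sen.map (fun s => max s 0)).sum.toNat) < fuel →
    evacLoop fuel sen op = evacAltLevels sen (m - 1).toNat (drainB (levelG sen m) op) := by
  intro fuel
  induction fuel with
  | zero => intro sen op m hmax hm1 hf; omega
  | succ fuel ih =>
    intro sen op m hmax hm1 hf
    have hub : ∀ y ∈ sen, y ≤ m := ((maxchar sen m).mp hmax).2
    have hmem : m ∈ sen := ((maxchar sen m).mp hmax).1
    have hm0 : ¬ m = 0 := by omega
    have hstep : evacLoop (fuel+1) sen op
        = evacLoop fuel (decL ((levelG sen m).take (cR (levelG sen m))) sen)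
            (op ++ lettersS ((levelG sen m).take (cR (levelG sen m))) ++ " ") := by
      rw [evacLoop, max_keys_eq, hmax]
      simp only [if_neg hm0]
      rw [cache_getD, eqList_eq_levelG sen m hub, removeA_eq]
    have hitemsne : levelG sen m ≠ [] := by
      rcases (mem_sen_pair sen m).mp hmem with ⟨p, hp, hpv⟩
      intro hnil
      have : p.1 ∈ levelG sen m := (mem_levelG sen m p.1).mpr ⟨p, hp, rfl, le_of_eq hpv.symm⟩
      simp [hnil] at this
    have hndl := nodup_levelG sen m
    have hnd : ((levelG sen m).take (cR (levelG sen m))).Nodup := hndl.take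
    have hin : ∀ i ∈ (levelG sen m).take (cR (levelG sen m)), 0 ≤ i ∧ i < (sen.length : Int) :=
      fun i hi => levelG_valid sen m i (List.take_subset _ _ hi)
    have hPT : ∀ p ∈ PySem.List.enumerate sen 0,
        p.1 ∈ (levelG sen m).take (cR (levelG sen m)) → p.2 = m :=
      fun p hp h => levelG_pairs sen m hub p hp (List.take_subset _ _ h)
    have hcne : cR (levelG sen m) ≠ 0 := by
      unfold cR; split <;> omega
    have htne : (levelG sen m).take (cR (levelG sen m)) ≠ [] := by
      intro h
      rcases List.take_eq_nil_iff.mp h with h1 | h1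
      · exact hcne h1
      · exact hitemsne h1
    have hdrain : drainB (levelG sen m) op
        = drainB ((levelG sen m).drop (cR (levelG sen m)))
            (op ++ lettersS ((levelG sen m).take (cR (levelG sen m))) ++ " ") :=
      drain_step (levelG sen m) op hitemsne
    have hsum := sumdec sen m _ hm1 hnd hin hPT htne
    have hf' : (((decL ((levelG sen m).take (cR (levelG sen m))) sen).map
        (fun s => max s 0)).sum).toNat < fuel := by
      have h0 := sum_maxzero_nonneg (decL ((levelG sen m).take (cR (levelG sen m))) sen)
      omega
    by_cases hrem : (levelG sen m).drop (cR (levelG sen m)) = []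
    · -- the whole top group is drained: the max drops to m - 1
      have hmax' := max_decL_done sen m (cR (levelG sen m)) hmax hm1 hrem htne
      rw [hstep, hdrain, hrem]
      have hdb : ∀ s, drainB [] s = s := fun s => by rw [drainB]
      rw [hdb]
      by_cases hm2 : m = 1
      · subst hm2
        norm_num
        cases fuel with
        | zero => omega
        | succ f =>
          rw [evacLoop, max_keys_eq, hmax']
          norm_num
          rfl
      · have hm1' : 1 ≤ m - 1 := by omega
        rw [ih _ _ (m-1) hmax' hm1' hf']
        have hcast : (m - 1).toNat = (m - 1 - 1).toNat + 1 := by omega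
        rw [hcast, evacAltLevels]
        have hv : ((m - 1 - 1).toNat : Int) + 1 = m - 1 := by omega
        rw [hv]
        rw [levelG_decL_lt sen _ m (m-1) hnd hin hPT (by omega) (by omega)]
        apply levels_cong
        intro v hv1 hv2
        exact levelG_decL_lt sen _ m v hnd hin hPT hv1 (by omega)
    · -- part of the top group remains at value m
      have hmax' := max_decL_rem sen m (cR (levelG sen m)) hmax hrem
      rw [hstep, hdrain]
      rw [ih _ _ m hmax' hm1 hf']
      rw [levelG_decL_top sen m (cR (levelG sen m)) hnd hin hPT]
      apply levels_cong
      intro v hv1 hv2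
      exact levelG_decL_lt sen _ m v hnd hin hPT hv1 (by omega)

-- ===== VERDICT (by name: the statement is the Claim_ definition above) =====
theorem evac_spec : Claim_equal_evac := by
  intro sen _ hpre
  unfold Spec_evac
  obtain ⟨hne, x, hx, hx0⟩ := hpre
  cases hmax : PySem.List.max? sen (fun x => x) with
  | none => exact absurd ((PySem.List.max?_eq_none_iff sen _).mp hmax) hne
  | some m =>
    have hb := (maxchar sen m).mp hmax
    have hm0 : 0 ≤ m := le_trans hx0 (hb.2 x hx)
    unfold evac evac_alt
    rw [hmax]
    show evacLoop ((sen.map (fun s => max s 0)).sum.toNat + 1) sen ""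
        = evacAltLevels sen m.toNat ""
    by_cases hm : m = 0
    · subst hm
      rw [evacLoop, max_keys_eq, hmax]
      norm_num
      rfl
    · have hm1 : 1 ≤ m := by omega
      rw [core _ sen "" m hmax hm1 (by omega)]
      have hcast : m.toNat = (m - 1).toNat + 1 := by omega
      rw [hcast, evacAltLevels]
      have hv : (((m - 1).toNat : Int) + 1) = m := by omega
      rw [hv]
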